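-- pv_equiv track=rewrite | github.com/pypi-data/pypi-mirror-193 | packages/shortscale/shortscale-1.1.1.tar.gz/shortscale-1.1.1/shortscale.py | powers_of_1000
-- ===== SOURCE A (Python) =====
-- def powers_of_1000(n: int):
--     """
--     Return list of (n, exponent) for each power of 1000.
--     List is ordered highest exponent first.
--     n = 0 - 999.
--     exponent = 0,1,2,3...
--     """
--     p_list = []
--     exponent = 0
--     while n > 0:
--         p_list.insert(0, (n % 1000, exponent))
--         n = n // 1000
--         exponent += 1
--
--     return p_list
-- ===== SOURCE B (Python) =====
-- def powers_of_1000(n: int):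
--     """
--     Return list of (n, exponent) for each power of 1000.
--     List is ordered highest exponent first.
--     """
--     k = 0
--     m = n
--     while m > 0:
--         m = m // 1000
--         k += 1
--     out = []
--     for exponent in range(k - 1, -1, -1):
--         out.append(((n // (1000 ** exponent)) % 1000, exponent))
--     return out
-- ===== Notes on version B (the rewrite author's own statement) =====
-- stated objective: alternative
-- what changed: Instead of peeling low groups bottom-up and inserting each at the front of the list, B first counts the number of base-1000 groups and then computes each group directly top-down as (n // 1000**e) % 1000 for e = k-1..0, appending in order.
import Mathlib
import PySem

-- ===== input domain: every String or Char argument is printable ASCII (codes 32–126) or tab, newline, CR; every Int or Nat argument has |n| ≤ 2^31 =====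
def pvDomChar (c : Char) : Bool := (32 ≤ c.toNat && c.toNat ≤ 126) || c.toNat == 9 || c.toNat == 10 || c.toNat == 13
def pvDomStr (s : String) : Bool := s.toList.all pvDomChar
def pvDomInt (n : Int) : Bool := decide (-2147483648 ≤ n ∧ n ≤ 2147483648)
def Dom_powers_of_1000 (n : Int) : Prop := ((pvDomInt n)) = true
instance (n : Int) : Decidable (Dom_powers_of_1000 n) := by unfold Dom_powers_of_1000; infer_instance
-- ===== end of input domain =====

-- B replaces A's bottom-up peel with insert(0,…) by counting the groups and computing each
-- group top-down directly; same cost, structurally different (objective: alternative).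

-- ===== PORT A =====
-- while n > 0: p_list.insert(0, (n % 1000, exponent)); n //= 1000; exponent += 1
def powAGo (n exponent : Int) (p_list : List (Int × Int)) : List (Int × Int) :=
  if _h : n > 0 then
    powAGo (PySem.Int.floordiv n 1000) (exponent + 1)
      ((PySem.Int.mod n 1000, exponent) :: p_list)
  else p_list
termination_by n.toNat
decreasing_by
  have _h2 : PySem.Int.floordiv n 1000 = n / 1000 :=
    PySem.Int.floordiv_eq_ediv_of_pos (by omega)
  omega

def powers_of_1000 (n : Int) : List (Int × Int) :=
  powAGo n 0 []

-- ===== PORT B =====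
-- while m > 0: m //= 1000; k += 1
def powBCount (m k : Int) : Int :=
  if _h : m > 0 then powBCount (PySem.Int.floordiv m 1000) (k + 1) else k
termination_by m.toNat
decreasing_by
  have _h2 : PySem.Int.floordiv m 1000 = m / 1000 :=
    PySem.Int.floordiv_eq_ediv_of_pos (by omega)
  omega

-- for exponent in range(k-1, -1, -1): out.append(((n // 1000**exponent) % 1000, exponent))
-- (1000 ** exponent : the loop variable is ≥ 0 on every iteration, so `.toNat` is exact)
def powers_of_1000_alt (n : Int) : List (Int × Int) :=
  let k := powBCount n 0
  (PySem.List.pyRange (k - 1) (-1) (-1)).foldl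
    (fun out e => out ++ [(PySem.Int.mod (PySem.Int.floordiv n (1000 ^ e.toNat)) 1000, e)]) []

-- ===== PRECONDITION & SPEC =====
def Spec_powers_of_1000 (n : Int) (out : List (Int × Int)) : Prop := out = powers_of_1000_alt n
instance (n : Int) (out : List (Int × Int)) : Decidable (Spec_powers_of_1000 n out) := by unfold Spec_powers_of_1000; infer_instance

-- ===== CLAIM (what is proved, stated in full; the proofs are below) =====
def Claim_equal_powers_of_1000 : Prop := ∀ (n : Int), Dom_powers_of_1000 n → Spec_powers_of_1000 n (powers_of_1000 n)

-- ===== LEMMAS AND PROOFS =====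

-- number of base-1000 groups, as a Nat (proof-side reference)
def pvGroups (n : Int) : Nat :=
  if _h : n > 0 then pvGroups (n / 1000) + 1 else 0
termination_by n.toNat
decreasing_by
  omega

theorem powBCount_eq (m k : Int) : powBCount m k = k + (pvGroups m : Int) := by
  rw [powBCount, pvGroups]
  split
  · rename_i h
    rw [powBCount_eq, PySem.Int.floordiv_eq_ediv_of_pos (by omega : (0:Int) < 1000)]
    push_cast; ring
  · simp
termination_by m.toNat
decreasing_by
  have _h2 : PySem.Int.floordiv m 1000 = m / 1000 :=
    PySem.Int.floordiv_eq_ediv_of_pos (by omega)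
  omega

theorem powAGo_acc (n e : Int) (acc : List (Int × Int)) :
    powAGo n e acc = powAGo n e [] ++ acc := by
  by_cases h : n > 0
  · conv_lhs => rw [powAGo.eq_def]
    conv_rhs => rw [powAGo.eq_def]
    simp only [dif_pos h]
    rw [powAGo_acc _ _ ((PySem.Int.mod n 1000, e) :: acc),
        powAGo_acc _ _ [(PySem.Int.mod n 1000, e)]]
    simp
  · conv_lhs => rw [powAGo.eq_def]
    conv_rhs => rw [powAGo.eq_def]
    simp only [dif_neg h]
    simp
termination_by n.toNat
decreasing_by
  all_goals
    have _h2 : PySem.Int.floordiv n 1000 = n / 1000 :=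
      PySem.Int.floordiv_eq_ediv_of_pos (by omega)
    omega

-- A's loop, characterised top-down
theorem powAGo_eq (n e : Int) :
    powAGo n e [] =
      (List.range (pvGroups n)).reverse.map
        (fun (j : Nat) => (PySem.Int.mod (PySem.Int.floordiv n (1000 ^ j)) 1000, e + (j : Int))) := by
  by_cases h : n > 0
  · have hdiv : PySem.Int.floordiv n 1000 = n / 1000 :=
      PySem.Int.floordiv_eq_ediv_of_pos (by omega)
    conv_lhs => rw [powAGo.eq_def]
    conv_rhs => rw [pvGroups.eq_def]
    simp only [dif_pos h]
    rw [powAGo_acc, powAGo_eq (PySem.Int.floordiv n 1000) (e + 1), hdiv,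
        List.range_succ_eq_map, List.reverse_cons, List.map_append,
        ← List.map_reverse, List.map_map]
    congr 1
    · apply List.map_congr_left
      intro j hj
      simp only [Function.comp]
      have hpow : (1000 : Int) ^ (j + 1) = 1000 * 1000 ^ j := by ring
      have hdd : PySem.Int.floordiv n (1000 ^ (j + 1)) =
          PySem.Int.floordiv (n / 1000) (1000 ^ j) := by
        rw [PySem.Int.floordiv_eq_ediv_of_pos (by positivity),
            PySem.Int.floordiv_eq_ediv_of_pos (by positivity), hpow,
            ← Int.ediv_ediv_of_nonneg (by omega : (0:Int) ≤ 1000)]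
      rw [Nat.succ_eq_add_one, hdd]
      congr 1
      push_cast; ring
    · simp
  · conv_lhs => rw [powAGo.eq_def]
    conv_rhs => rw [pvGroups.eq_def]
    simp [h]
termination_by n.toNat
decreasing_by
  all_goals
    have _h2 : PySem.Int.floordiv n 1000 = n / 1000 :=
      PySem.Int.floordiv_eq_ediv_of_pos (by omega)
    omega

theorem pyRange_down (k : Nat) :
    PySem.List.pyRange ((k : Int) - 1) (-1) (-1) =
      (List.range k).reverse.map (fun (j : Nat) => (j : Int)) := by
  rw [PySem.List.pyRange_neg_one]
  have hk : ((k : Int) - 1 - (-1)).toNat = k := by omega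
  rw [hk]
  apply List.ext_getElem
  · simp
  · intro i h1 _h2
    simp only [List.getElem_map, List.getElem_range, List.getElem_reverse,
      List.length_map, List.length_reverse, List.length_range] at h1 _h2 ⊢
    omega

-- ===== VERDICT (by name: the statement is the Claim_ definition above) =====
theorem powers_of_1000_spec : Claim_equal_powers_of_1000 := by
  intro n _
  show powers_of_1000 n = powers_of_1000_alt n
  unfold powers_of_1000 powers_of_1000_alt
  rw [powAGo_eq, powBCount_eq]
  simp only [zero_add]
  rw [pyRange_down, PySem.List.foldl_append_singleton_eq_map, List.map_map]
  apply List.map_congr_left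
  intro j hj
  simp at hj ⊢
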